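-- pv_equiv track=rewrite | github.com/Emoto13/Python101 | week1/week1_solutions_part2.py | message_to_numbers
-- ===== SOURCE A (Python) =====
-- def message_to_numbers(message):
--     dictionary = {
--         '2': 'a',
--         '22': 'b',
--         '222': 'c',
--         '3': 'd',
--         '33': 'e',
--         '333': 'f',
--         '4': 'g',
--         '44': 'h',
--         '444': 'i',
--         '5': 'j',
--         '55': 'k',
--         '555': 'l',
--         '6': 'm',
--         '66': 'n',
--         '666': 'o',
--         '7': 'p',
--         '77': 'q',
--         '777': 'r',
--         '7777': 's',
--         '8': 't',
--         '88': 'u',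
--         '888': 'v',
--         '9': 'w',
--         '99': 'x',
--         '999': 'y',
--         '9999': 'z',
--         '0': ' ',
--
--         '12': 'A',
--         '122': 'B',
--         '1222': 'C',
--         '13': 'D',
--         '133': 'E',
--         '1333': 'F',
--         '14': 'G',
--         '144': 'H',
--         '1444': 'I',
--         '15': 'J',
--         '155': 'K',
--         '1555': 'L',
--         '16': 'M',
--         '166': 'N',
--         '1666': 'O',
--         '17': 'P',
--         '177': 'Q',
--         '1777': 'R',
--         '17777': 'S',
--         '18': 'T',
--         '188': 'U',
--         '1888': 'V',
--         '19': 'W',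
--         '199': 'X',
--         '1999': 'Y',
--         '19999': 'Z',
--     }
--
--     reverse_dictionary = {value: list(map(int, key)) for key, value in dictionary.items()}
--     res_list = []
--     for i in range(len(message)):
--         current_message = message[i]
--         first_letter = current_message[0]
--
--         if i > 0 and reverse_dictionary[current_message][0] == reverse_dictionary[message[i - 1]][0]:
--             res_list.append(-1)
--
--         res_list.extend(reverse_dictionary[current_message])
--     return res_list
-- ===== SOURCE B (Python) =====
-- # B: a staged, group-based algorithm: first split the message into maximal runs of
-- # characters sharing the same first keypad digit (no separator decisions during the
-- # scan), then render each run by joining its digit sequences with a single -1 and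
-- # concatenate the rendered runs.  The char->digits table is generated arithmetically.
--
-- def _keypad():
--     mapping = {' ': [0]}
--     for digit, letters in enumerate(["abc", "def", "ghi", "jkl", "mno", "pqrs", "tuv", "wxyz"], start=2):
--         for reps, ch in enumerate(letters, start=1):
--             mapping[ch] = [digit] * reps
--             mapping[ch.upper()] = [1] + [digit] * reps
--     return mapping
--
-- _KEYPAD = _keypad()
--
-- def _join(run):
--     res = run[0][:]
--     for seq in run[1:]:
--         res.append(-1)
--         res += seq
--     return res
--
-- def message_to_numbers(message):
--     runs = []
--     for c in message:
--         seq = _KEYPAD[c]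
--         if runs and runs[-1][0][0] == seq[0]:
--             runs[-1].append(seq)
--         else:
--             runs.append([seq])
--     out = []
--     for run in runs:
--         out += _join(run)
--     return out
-- ===== Notes on version B (the rewrite author's own statement) =====
-- stated objective: alternative
-- what changed: B replaces A's single index-based pass that decides each separator by re-looking-up the previous character with a staged group-based algorithm: it first splits the message into maximal runs of characters sharing a first keypad digit, then renders each run by joining its digit sequences with -1 and concatenates the runs; the table is generated arithmetically instead of inverting a literal string->char dict.
import Mathlib
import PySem

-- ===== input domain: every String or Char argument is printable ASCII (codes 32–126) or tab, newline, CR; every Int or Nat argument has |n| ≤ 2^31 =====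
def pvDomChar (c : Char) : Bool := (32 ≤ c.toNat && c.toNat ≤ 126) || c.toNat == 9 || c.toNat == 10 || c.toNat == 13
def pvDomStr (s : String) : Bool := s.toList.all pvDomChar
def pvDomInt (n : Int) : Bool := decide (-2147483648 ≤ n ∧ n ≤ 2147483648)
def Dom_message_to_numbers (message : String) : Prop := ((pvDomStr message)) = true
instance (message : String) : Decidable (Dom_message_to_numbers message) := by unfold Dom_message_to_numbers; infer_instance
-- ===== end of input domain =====

-- B replaces A's single index-based pass (separator decided per position by re-looking-up the
-- previous character) with a staged group-based algorithm: split the message into maximal runs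
-- of characters sharing a first keypad digit, then join each run's digit sequences with -1 and
-- concatenate the runs; the table is generated arithmetically (objective: alternative).

-- ===== PORT A =====
-- A's literal dictionary (key string -> character), in source order.
def pvDictA : List (String × Char) :=
  [("2",'a'),("22",'b'),("222",'c'),("3",'d'),("33",'e'),("333",'f'),
   ("4",'g'),("44",'h'),("444",'i'),("5",'j'),("55",'k'),("555",'l'),
   ("6",'m'),("66",'n'),("666",'o'),("7",'p'),("77",'q'),("777",'r'),("7777",'s'),
   ("8",'t'),("88",'u'),("888",'v'),("9",'w'),("99",'x'),("999",'y'),("9999",'z'),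
   ("0",' '),
   ("12",'A'),("122",'B'),("1222",'C'),("13",'D'),("133",'E'),("1333",'F'),
   ("14",'G'),("144",'H'),("1444",'I'),("15",'J'),("155",'K'),("1555",'L'),
   ("16",'M'),("166",'N'),("1666",'O'),("17",'P'),("177",'Q'),("1777",'R'),("17777",'S'),
   ("18",'T'),("188",'U'),("1888",'V'),("19",'W'),("199",'X'),("1999",'Y'),("19999",'Z')]

-- reverse_dictionary = {value: list(map(int, key)) …}; values are distinct so the comprehension is a map.
-- int(ch) on a digit character is ch.toNat - 48 (exact on '0'..'9', the only characters occurring).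
def pvRevA : PySem.Dict Char (List Int) :=
  PySem.Dict.mk (pvDictA.map (fun kv => (kv.2, kv.1.toList.map (fun ch => ((ch.toNat : Int) - 48)))))

-- reverse_dictionary[c] raises KeyError on unmapped characters: those inputs are excluded by
-- Pre_; under Pre_ every lookup hits and every digit list is nonempty, so getD []/headD 0 are exact.
def message_to_numbers (message : String) : List Int :=
  (List.range message.toList.length).foldl (fun res i =>
    let current_message := message.toList.getD i ' '
    let cur := pvRevA.getD current_message []
    (if 0 < i ∧ cur.headD 0 = (pvRevA.getD (message.toList.getD (i - 1) ' ') []).headD 0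
     then res ++ [-1] else res) ++ cur) []

-- ===== PORT B =====
-- _keypad(): mapping built arithmetically with enumerate/replicate, as in Source B.
def pvKeypad : PySem.Dict Char (List Int) :=
  (PySem.List.enumerate ["abc","def","ghi","jkl","mno","pqrs","tuv","wxyz"] 2).foldl
    (fun d p =>
      (PySem.List.enumerate p.2.toList 1).foldl
        (fun d q =>
          let seq := List.replicate q.1.toNat p.1
          (d.insert q.2 seq).insert (PySem.Chars.upperChar q.2) ([1] ++ seq))
        d)
    (PySem.Dict.empty.insert ' ' [0])

-- _join(run): res = run[0][:]; for seq in run[1:]: res.append(-1); res += seq.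
-- run[0] is read with headD []: _join is only ever called on nonempty runs.
def pvJoin (run : List (List Int)) : List Int :=
  (run.drop 1).foldl (fun res seq => (res ++ [-1]) ++ seq) (run.headD [])

-- first loop: split into runs of equal first digit (runs[-1].append(seq) becomes
-- dropLast ++ [last ++ [seq]]); second loop: out += _join(run) over the runs.
-- _KEYPAD[c] raises KeyError on unmapped characters (excluded by Pre_); getD []/headD 0 exact under Pre_.
def message_to_numbers_alt (message : String) : List Int :=
  let runs := message.toList.foldl (fun runs c =>
    let seq := pvKeypad.getD c []
    if runs ≠ [] ∧ (((runs.getLastD []).headD []).headD 0) = seq.headD 0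
    then runs.dropLast ++ [runs.getLastD [] ++ [seq]]
    else runs ++ [[seq]]) []
  runs.foldl (fun out run => out ++ pvJoin run) []

-- ===== PRECONDITION & SPEC =====
def pvAllowed : List Char :=
  [' ', 'a', 'b', 'c', 'd', 'e', 'f', 'g', 'h', 'i', 'j', 'k', 'l', 'm', 'n', 'o', 'p', 'q', 'r', 's', 't', 'u', 'v', 'w', 'x', 'y', 'z', 'A', 'B', 'C', 'D', 'E', 'F', 'G', 'H', 'I', 'J', 'K', 'L', 'M', 'N', 'O', 'P', 'Q', 'R', 'S', 'T', 'U', 'V', 'W', 'X', 'Y', 'Z']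

-- Pre_ excludes exactly the messages containing a character outside the keypad table
-- (letters and space), on which A raises KeyError.
def Pre_message_to_numbers (message : String) : Prop :=
  message.toList.all (fun c => pvAllowed.contains c) = true
instance (message : String) : Decidable (Pre_message_to_numbers message) := by
  unfold Pre_message_to_numbers; infer_instance

def pvWitness_message_to_numbers : String := "Hi"

def Spec_message_to_numbers (message : String) (out : List Int) : Prop := out = message_to_numbers_alt message
instance (message : String) (out : List Int) : Decidable (Spec_message_to_numbers message out) := by unfold Spec_message_to_numbers; infer_instance

-- ===== CLAIM (what is proved, stated in full; the proofs are below) =====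
def Claim_equal_message_to_numbers : Prop := ∀ (message : String), Dom_message_to_numbers message → Pre_message_to_numbers message → Spec_message_to_numbers message (message_to_numbers message)

-- ===== LEMMAS AND PROOFS =====

-- canonical pairwise form both ports are reduced to
def pvGo (f : Char → List Int) (prev : Char) : List Char → List Int
  | [] => []
  | c :: cs => ((if (f prev).headD 0 = (f c).headD 0 then [-1] else []) ++ f c) ++ pvGo f c cs

def pvCanon (f : Char → List Int) : List Char → List Int
  | [] => []
  | c :: cs => f c ++ pvGo f c cs

lemma pvGo_congr (f g : Char → List Int) (prev : Char) (cs : List Char)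
    (h : ∀ c ∈ prev :: cs, f c = g c) : pvGo f prev cs = pvGo g prev cs := by
  induction cs generalizing prev with
  | nil => rfl
  | cons c cs ih =>
    simp only [pvGo]
    rw [h prev (by simp), h c (by simp),
      ih c (fun x hx => h x (List.mem_cons_of_mem _ hx))]

lemma pvCanon_congr (f g : Char → List Int) (l : List Char)
    (h : ∀ c ∈ l, f c = g c) : pvCanon f l = pvCanon g l := by
  cases l with
  | nil => rfl
  | cons c cs =>
    simp only [pvCanon, h c (by simp), pvGo_congr f g c cs (fun x hx => h x hx)]

-- evaluated forms of the two dictionaries (proof helpers only)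
def pvLitA : List (Char × List Int) :=
  [('a', [2]), ('b', [2, 2]), ('c', [2, 2, 2]), ('d', [3]), ('e', [3, 3]), ('f', [3, 3, 3]),
   ('g', [4]), ('h', [4, 4]), ('i', [4, 4, 4]), ('j', [5]), ('k', [5, 5]), ('l', [5, 5, 5]),
   ('m', [6]), ('n', [6, 6]), ('o', [6, 6, 6]), ('p', [7]), ('q', [7, 7]), ('r', [7, 7, 7]),
   ('s', [7, 7, 7, 7]), ('t', [8]), ('u', [8, 8]), ('v', [8, 8, 8]), ('w', [9]), ('x', [9, 9]),
   ('y', [9, 9, 9]), ('z', [9, 9, 9, 9]), (' ', [0]),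
   ('A', [1, 2]), ('B', [1, 2, 2]), ('C', [1, 2, 2, 2]), ('D', [1, 3]), ('E', [1, 3, 3]),
   ('F', [1, 3, 3, 3]), ('G', [1, 4]), ('H', [1, 4, 4]), ('I', [1, 4, 4, 4]), ('J', [1, 5]),
   ('K', [1, 5, 5]), ('L', [1, 5, 5, 5]), ('M', [1, 6]), ('N', [1, 6, 6]), ('O', [1, 6, 6, 6]),
   ('P', [1, 7]), ('Q', [1, 7, 7]), ('R', [1, 7, 7, 7]), ('S', [1, 7, 7, 7, 7]), ('T', [1, 8]),
   ('U', [1, 8, 8]), ('V', [1, 8, 8, 8]), ('W', [1, 9]), ('X', [1, 9, 9]), ('Y', [1, 9, 9, 9]),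
   ('Z', [1, 9, 9, 9, 9])]
def pvLitB : List (Char × List Int) :=
  [(' ', [0]),
   ('a', [2]), ('A', [1, 2]), ('b', [2, 2]), ('B', [1, 2, 2]), ('c', [2, 2, 2]), ('C', [1, 2, 2, 2]),
   ('d', [3]), ('D', [1, 3]), ('e', [3, 3]), ('E', [1, 3, 3]), ('f', [3, 3, 3]), ('F', [1, 3, 3, 3]),
   ('g', [4]), ('G', [1, 4]), ('h', [4, 4]), ('H', [1, 4, 4]), ('i', [4, 4, 4]), ('I', [1, 4, 4, 4]),
   ('j', [5]), ('J', [1, 5]), ('k', [5, 5]), ('K', [1, 5, 5]), ('l', [5, 5, 5]), ('L', [1, 5, 5, 5]),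
   ('m', [6]), ('M', [1, 6]), ('n', [6, 6]), ('N', [1, 6, 6]), ('o', [6, 6, 6]), ('O', [1, 6, 6, 6]),
   ('p', [7]), ('P', [1, 7]), ('q', [7, 7]), ('Q', [1, 7, 7]), ('r', [7, 7, 7]), ('R', [1, 7, 7, 7]),
   ('s', [7, 7, 7, 7]), ('S', [1, 7, 7, 7, 7]),
   ('t', [8]), ('T', [1, 8]), ('u', [8, 8]), ('U', [1, 8, 8]), ('v', [8, 8, 8]), ('V', [1, 8, 8, 8]),
   ('w', [9]), ('W', [1, 9]), ('x', [9, 9]), ('X', [1, 9, 9]), ('y', [9, 9, 9]), ('Y', [1, 9, 9, 9]),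
   ('z', [9, 9, 9, 9]), ('Z', [1, 9, 9, 9, 9])]

lemma pvRevA_eval : pvRevA = PySem.Dict.mk pvLitA := by decide

set_option maxRecDepth 4000 in
set_option maxHeartbeats 1000000 in
lemma pvKeypad_eval : pvKeypad = PySem.Dict.mk pvLitB := by decide

set_option maxRecDepth 2000 in
lemma pvLookup_lit :
    pvAllowed.all (fun c => (PySem.Dict.mk pvLitA).getD c [] == (PySem.Dict.mk pvLitB).getD c []) = true := by
  rfl

lemma pvLookup_eq : ∀ c ∈ pvAllowed, pvRevA.getD c [] = pvKeypad.getD c [] := by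
  intro c hc
  rw [pvRevA_eval, pvKeypad_eval]
  exact eq_of_beq (List.all_eq_true.mp pvLookup_lit c hc)

lemma pvGo_snoc (f : Char → List Int) (prev : Char) (cs : List Char) (x : Char) :
    pvGo f prev (cs ++ [x]) =
      pvGo f prev cs ++
        ((if (f (cs.getLastD prev)).headD 0 = (f x).headD 0 then [-1] else []) ++ f x) := by
  induction cs generalizing prev with
  | nil => simp [pvGo]
  | cons c cs ih =>
    simp only [List.cons_append, pvGo, ih c, List.getLastD_cons, List.append_assoc]

lemma pvCanon_snoc (f : Char → List Int) (xs : List Char) (x : Char) :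
    pvCanon f (xs ++ [x]) =
      pvCanon f xs ++
        ((if xs = [] then []
          else if (f (xs.getLastD ' ')).headD 0 = (f x).headD 0 then [-1] else []) ++ f x) := by
  cases xs with
  | nil => simp [pvCanon, pvGo]
  | cons c cs =>
    simp only [List.cons_append, pvCanon, pvGo_snoc, List.getLastD_cons, List.append_assoc,
      if_neg (List.cons_ne_nil c cs)]

lemma pvGetD_last (xs : List Char) :
    xs.getD (xs.length - 1) ' ' = xs.getLastD ' ' := by
  rw [List.getD_eq_getElem?_getD, ← List.getLast?_eq_getElem?, List.getLastD_eq_getLast?]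

-- A's index loop computes the canonical pairwise form.
lemma pvA_eq (f : Char → List Int) (l : List Char) :
    (List.range l.length).foldl (fun res i =>
      (if 0 < i ∧ (f (l.getD i ' ')).headD 0 = (f (l.getD (i - 1) ' ')).headD 0
       then res ++ [-1] else res) ++ f (l.getD i ' ')) [] = pvCanon f l := by
  induction l using List.reverseRecOn with
  | nil => rfl
  | append_singleton xs x ih =>
    have hlen : (xs ++ [x]).length = xs.length + 1 := by simp
    rw [hlen, List.range_succ, List.foldl_append]
    have hcongr :
        (List.range xs.length).foldl (fun res i =>
          (if 0 < i ∧ (f ((xs ++ [x]).getD i ' ')).headD 0 = (f ((xs ++ [x]).getD (i - 1) ' ')).headD 0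
           then res ++ [-1] else res) ++ f ((xs ++ [x]).getD i ' ')) [] =
        (List.range xs.length).foldl (fun res i =>
          (if 0 < i ∧ (f (xs.getD i ' ')).headD 0 = (f (xs.getD (i - 1) ' ')).headD 0
           then res ++ [-1] else res) ++ f (xs.getD i ' ')) [] := by
      apply PySem.List.foldl_congr_mem
      intro acc i hi
      have hi' : i < xs.length := List.mem_range.mp hi
      have h1 : (xs ++ [x]).getD i ' ' = xs.getD i ' ' := List.getD_append _ _ _ _ hi'
      have h2 : (xs ++ [x]).getD (i - 1) ' ' = xs.getD (i - 1) ' ' :=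
        List.getD_append _ _ _ _ (by omega)
      rw [h1, h2]
    rw [hcongr, ih, pvCanon_snoc]
    simp only [List.foldl_cons, List.foldl_nil]
    have hx : (xs ++ [x]).getD xs.length ' ' = x := by
      simp [List.getD_eq_getElem?_getD]
    rw [hx]
    cases xs with
    | nil => simp
    | cons c cs =>
      have hprev : ((c :: cs) ++ [x]).getD ((c :: cs).length - 1) ' ' = (c :: cs).getLastD ' ' := by
        rw [List.getD_append _ _ _ _ (by simp)]
        exact pvGetD_last _
      rw [hprev]
      by_cases hd : (f ((c :: cs).getLastD ' ')).headD 0 = (f x).headD 0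
      · rw [if_pos ⟨by simp, hd.symm⟩, if_neg (List.cons_ne_nil c cs), if_pos hd]; simp
      · rw [if_neg (fun h => hd h.2.symm), if_neg (List.cons_ne_nil c cs), if_neg hd]; simp

-- B-side reasoning: the run-splitting fold, abstracted over the lookup function
def pvRuns (f : Char → List Int) (l : List Char) : List (List (List Int)) :=
  l.foldl (fun runs c =>
    let seq := f c
    if runs ≠ [] ∧ (((runs.getLastD []).headD []).headD 0) = seq.headD 0
    then runs.dropLast ++ [runs.getLastD [] ++ [seq]]
    else runs ++ [[seq]]) []

def pvEmit (runs : List (List (List Int))) : List Int :=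
  runs.foldl (fun out run => out ++ pvJoin run) []

lemma pvEmit_eq_flatMap (runs : List (List (List Int))) :
    pvEmit runs = runs.flatMap pvJoin := by
  unfold pvEmit
  rw [PySem.List.foldl_append_eq_flatMap]
  rfl

lemma pvJoin_snoc (s : List Int) (rest : List (List Int)) (seq : List Int) :
    pvJoin ((s :: rest) ++ [seq]) = pvJoin (s :: rest) ++ [-1] ++ seq := by
  simp [pvJoin, List.foldl_append, List.append_assoc]

-- invariant of the run-splitting fold: runs empty iff message empty; the last run is a
-- nonempty run whose first sequence's head equals the last character's sequence head;
-- and emitting the runs yields the canonical pairwise form.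
lemma pvRuns_inv (f : Char → List Int) (l : List Char) :
    (pvRuns f l = [] ↔ l = []) ∧
    (l ≠ [] → ∃ rs s rest, pvRuns f l = rs ++ [s :: rest] ∧
        s.headD 0 = (f (l.getLastD ' ')).headD 0) ∧
    pvEmit (pvRuns f l) = pvCanon f l := by
  induction l using List.reverseRecOn with
  | nil => exact ⟨by simp [pvRuns], by simp, rfl⟩
  | append_singleton xs x ih =>
    obtain ⟨hemp, hlast, hemit⟩ := ih
    have hstep : pvRuns f (xs ++ [x]) =
        (if pvRuns f xs ≠ [] ∧ ((((pvRuns f xs).getLastD []).headD []).headD 0) = (f x).headD 0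
         then (pvRuns f xs).dropLast ++ [(pvRuns f xs).getLastD [] ++ [f x]]
         else pvRuns f xs ++ [[f x]]) := by
      unfold pvRuns
      rw [List.foldl_append]
      rfl
    by_cases hnil : xs = []
    · subst hnil
      have h0 : pvRuns f ([] : List Char) = [] := by simp [pvRuns]
      rw [hstep, if_neg (by simp [h0])]
      refine ⟨by simp [h0], fun _ => ⟨[], f x, [], by simp [h0], by simp⟩, ?_⟩
      simp [h0, pvEmit, pvJoin, pvCanon, pvGo]
    · obtain ⟨rs, s, rest, hr, hs⟩ := hlast hnil
      have hlastD : (pvRuns f xs).getLastD [] = s :: rest := by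
        rw [hr]; simp
      by_cases hd : (f (xs.getLastD ' ')).headD 0 = (f x).headD 0
      · -- same first digit: x joins the last run
        have hcond : pvRuns f xs ≠ [] ∧ ((((pvRuns f xs).getLastD []).headD []).headD 0) = (f x).headD 0 := by
          refine ⟨by rw [hr]; simp, ?_⟩
          rw [hlastD, List.headD_cons, hs]; exact hd
        rw [hstep, if_pos hcond]
        have hdrop : (pvRuns f xs).dropLast = rs := by rw [hr]; simp
        refine ⟨by simp, fun _ => ⟨rs, s, rest ++ [f x], by rw [hdrop, hlastD]; simp, ?_⟩, ?_⟩
        · rw [show (xs ++ [x]).getLastD ' ' = x from by simp, hs]; exact hd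
        · rw [hdrop, hlastD, pvEmit_eq_flatMap, List.flatMap_append]
          simp only [List.flatMap_cons, List.flatMap_nil, List.append_nil]
          rw [pvJoin_snoc, pvCanon_snoc f xs x, if_neg hnil, if_pos hd,
            ← hemit, pvEmit_eq_flatMap, hr, List.flatMap_append]
          simp [List.append_assoc]
      · -- different first digit: a new run starts
        have hcond : ¬ (pvRuns f xs ≠ [] ∧ ((((pvRuns f xs).getLastD []).headD []).headD 0) = (f x).headD 0) := by
          rintro ⟨-, h⟩
          rw [hlastD, List.headD_cons, hs] at h
          exact hd h
        rw [hstep, if_neg hcond]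
        refine ⟨by simp, fun _ => ⟨pvRuns f xs, f x, [], rfl, by simp⟩, ?_⟩
        rw [pvEmit_eq_flatMap, List.flatMap_append, pvCanon_snoc f xs x, if_neg hnil,
          if_neg hd, ← hemit, pvEmit_eq_flatMap]
        simp [pvJoin]

lemma pvB_eq (message : String) :
    message_to_numbers_alt message = pvCanon (fun c => pvKeypad.getD c []) message.toList := by
  unfold message_to_numbers_alt
  exact (pvRuns_inv (fun c => pvKeypad.getD c []) message.toList).2.2

-- ===== VERDICT (by name: the statement is the Claim_ definition above) =====
theorem message_to_numbers_spec : Claim_equal_message_to_numbers := by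
  intro message _hdom hpre
  unfold Spec_message_to_numbers
  have hA : message_to_numbers message =
      pvCanon (fun c => pvRevA.getD c []) message.toList := by
    unfold message_to_numbers
    exact pvA_eq (fun c => pvRevA.getD c []) message.toList
  have hB : message_to_numbers_alt message =
      pvCanon (fun c => pvKeypad.getD c []) message.toList := pvB_eq message
  rw [hA, hB]
  refine pvCanon_congr _ _ _ (fun c hc => pvLookup_eq c ?_)
  have := List.all_eq_true.mp hpre c hc
  simpa using this
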